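-- pv_equiv track=rewrite | github.com/Frankyoel/Ahorcado-con-Python | ahorcado1.py | get_clicked_letter
-- ===== SOURCE A (Python) =====
-- def get_clicked_letter(mouse_x, mouse_y):
--     letras = "ABCDEFGHIJKLMNOPQRSTUVWXYZ"
--     x_start = 100
--     y_start = 120
--     btn_width = 40
--     btn_height = 40
--     spacing = 5
--     por_fila = 13
--
--     for i, letra in enumerate(letras):
--         fila = i // por_fila
--         columna = i % por_fila
--
--         x = x_start + columna * (btn_width + spacing)
--         y = y_start - fila * (btn_height + spacing)
--
--         if (x <= mouse_x <= x + btn_width and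
--             y - btn_height <= mouse_y <= y):
--             return letra
--     return None
-- ===== SOURCE B (Python) =====
-- def get_clicked_letter(mouse_x, mouse_y):
--     letras = "ABCDEFGHIJKLMNOPQRSTUVWXYZ"
--     col, xr = divmod(mouse_x - 100, 45)
--     fila, yr = divmod(120 - mouse_y, 45)
--     if 0 <= col < 13 and 0 <= fila < 2 and xr <= 40 and yr <= 40:
--         return letras[fila * 13 + col]
--     return None
-- ===== Notes on version B (the rewrite author's own statement) =====
-- stated objective: simpler
-- what changed: Replaces A's linear scan over all 26 letter buttons with direct divmod grid-cell arithmetic: compute the column/row from the click coordinates, check the remainder falls inside the 40px button (not the 5px gap), and index the letter string once.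
import Mathlib
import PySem

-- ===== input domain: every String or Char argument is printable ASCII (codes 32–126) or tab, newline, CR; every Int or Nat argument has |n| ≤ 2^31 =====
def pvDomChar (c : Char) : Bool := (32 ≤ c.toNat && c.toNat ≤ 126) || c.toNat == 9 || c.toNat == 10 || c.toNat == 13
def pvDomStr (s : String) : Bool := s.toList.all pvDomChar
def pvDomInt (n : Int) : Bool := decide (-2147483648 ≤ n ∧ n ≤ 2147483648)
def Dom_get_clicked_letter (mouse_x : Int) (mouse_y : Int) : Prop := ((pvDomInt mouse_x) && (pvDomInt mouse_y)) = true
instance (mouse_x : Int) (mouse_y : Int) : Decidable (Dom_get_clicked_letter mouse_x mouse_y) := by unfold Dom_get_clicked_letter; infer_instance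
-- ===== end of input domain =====

-- B replaces A's 26-button linear scan by direct divmod grid-cell arithmetic (same return value; objective: simpler/faster constant).

-- ===== PORT A =====
-- the body of A's `for i, letra in enumerate(letras)` loop, as structural recursion over the enumerated pairs
def pvLoopA (mouse_x : Int) (mouse_y : Int) : List (Int × Char) → Option String
  | [] => none
  | (i, letra) :: rest =>
    let fila := PySem.Int.floordiv i 13
    let columna := PySem.Int.mod i 13
    let x := 100 + columna * (40 + 5)
    let y := 120 - fila * (40 + 5)
    if x ≤ mouse_x ∧ mouse_x ≤ x + 40 ∧ y - 40 ≤ mouse_y ∧ mouse_y ≤ y then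
      some (String.singleton letra)
    else
      pvLoopA mouse_x mouse_y rest

def get_clicked_letter (mouse_x : Int) (mouse_y : Int) : Option String :=
  pvLoopA mouse_x mouse_y (PySem.List.enumerate "ABCDEFGHIJKLMNOPQRSTUVWXYZ".toList 0)

-- ===== PORT B =====
def get_clicked_letter_alt (mouse_x : Int) (mouse_y : Int) : Option String :=
  let letras := "ABCDEFGHIJKLMNOPQRSTUVWXYZ"
  let col := PySem.Int.floordiv (mouse_x - 100) 45
  let xr := PySem.Int.mod (mouse_x - 100) 45
  let fila := PySem.Int.floordiv (120 - mouse_y) 45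
  let yr := PySem.Int.mod (120 - mouse_y) 45
  if 0 ≤ col ∧ col < 13 ∧ 0 ≤ fila ∧ fila < 2 ∧ xr ≤ 40 ∧ yr ≤ 40 then
    (PySem.Str.pyGet? letras (fila * 13 + col)).map String.singleton
  else
    none

-- ===== PRECONDITION & SPEC =====
def Spec_get_clicked_letter (mouse_x : Int) (mouse_y : Int) (out : Option String) : Prop := out = get_clicked_letter_alt mouse_x mouse_y
instance (mouse_x : Int) (mouse_y : Int) (out : Option String) : Decidable (Spec_get_clicked_letter mouse_x mouse_y out) := by unfold Spec_get_clicked_letter; infer_instance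

-- ===== CLAIM (what is proved, stated in full; the proofs are below) =====
def Claim_equal_get_clicked_letter : Prop := ∀ (mouse_x : Int) (mouse_y : Int), Dom_get_clicked_letter mouse_x mouse_y → Spec_get_clicked_letter mouse_x mouse_y (get_clicked_letter mouse_x mouse_y)

-- ===== LEMMAS AND PROOFS =====

-- if the click lies inside the button of (col c, row r), B returns letras[r*13+c]
theorem pvAltHit (mouse_x mouse_y c r : Int)
    (h : 0 ≤ c ∧ c < 13 ∧ 0 ≤ r ∧ r < 2 ∧
         100 + 45 * c ≤ mouse_x ∧ mouse_x ≤ 140 + 45 * c ∧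
         80 - 45 * r ≤ mouse_y ∧ mouse_y ≤ 120 - 45 * r) :
    get_clicked_letter_alt mouse_x mouse_y
      = (PySem.Str.pyGet? "ABCDEFGHIJKLMNOPQRSTUVWXYZ" (r * 13 + c)).map String.singleton := by
  have hc : PySem.Int.floordiv (mouse_x - 100) 45 = c :=
    (PySem.Int.floordiv_eq_iff_of_pos (by omega)).2 (by omega)
  have hr : PySem.Int.floordiv (120 - mouse_y) 45 = r :=
    (PySem.Int.floordiv_eq_iff_of_pos (by omega)).2 (by omega)
  have hxm := PySem.Int.floordiv_mul_add_mod (mouse_x - 100) 45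
  have hym := PySem.Int.floordiv_mul_add_mod (120 - mouse_y) 45
  rw [hc] at hxm; rw [hr] at hym
  unfold get_clicked_letter_alt
  rw [if_pos]
  · rw [hc, hr]
  · refine ⟨by omega, by omega, by omega, by omega, by omega, by omega⟩

-- if no button of the 13×2 grid contains the click, B returns none
theorem pvAltMiss (mx my : Int)
    (h : ∀ c r : Int, 0 ≤ c → c < 13 → 0 ≤ r → r < 2 →
      ¬(100 + 45 * c ≤ mx ∧ mx ≤ 140 + 45 * c ∧ 80 - 45 * r ≤ my ∧ my ≤ 120 - 45 * r)) :
    get_clicked_letter_alt mx my = none := by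
  unfold get_clicked_letter_alt
  rw [if_neg]
  intro hg
  obtain ⟨g1, g2, g3, g4, g5, g6⟩ := hg
  have hxm := PySem.Int.floordiv_mul_add_mod (mx - 100) 45
  have hym := PySem.Int.floordiv_mul_add_mod (120 - my) 45
  have hx1 := PySem.Int.mod_nonneg (a := mx - 100) (b := 45) (by norm_num)
  have hx2 := PySem.Int.mod_lt (a := mx - 100) (b := 45) (by norm_num)
  have hy1 := PySem.Int.mod_nonneg (a := 120 - my) (b := 45) (by norm_num)
  have hy2 := PySem.Int.mod_lt (a := 120 - my) (b := 45) (by norm_num)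
  exact h _ _ g1 g2 g3 g4 ⟨by omega, by omega, by omega, by omega⟩

set_option maxHeartbeats 2000000 in
theorem get_clicked_letter_spec_aux (mouse_x mouse_y : Int) :
    get_clicked_letter mouse_x mouse_y = get_clicked_letter_alt mouse_x mouse_y := by
  unfold get_clicked_letter
  rw [show PySem.List.enumerate "ABCDEFGHIJKLMNOPQRSTUVWXYZ".toList 0
        = [(0, 'A'), (1, 'B'), (2, 'C'), (3, 'D'), (4, 'E'), (5, 'F'), (6, 'G'), (7, 'H'), (8, 'I'), (9, 'J'), (10, 'K'), (11, 'L'), (12, 'M'), (13, 'N'), (14, 'O'), (15, 'P'), (16, 'Q'), (17, 'R'), (18, 'S'), (19, 'T'), (20, 'U'), (21, 'V'), (22, 'W'), (23, 'X'), (24, 'Y'), (25, 'Z')] from by decide]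
  simp only [pvLoopA]
  norm_num [PySem.Int.floordiv_eq_ediv_of_pos (b := 13) (by norm_num),
            PySem.Int.mod_eq_emod_of_pos (b := 13) (by norm_num)]
  by_cases h1 : 100 ≤ mouse_x ∧ mouse_x ≤ 140 ∧ 80 ≤ mouse_y ∧ mouse_y ≤ 120
  · rw [if_pos h1]
    exact ((pvAltHit mouse_x mouse_y 0 0 (by omega)).trans (by decide)).symm
  rw [if_neg h1]
  by_cases h2 : 145 ≤ mouse_x ∧ mouse_x ≤ 185 ∧ 80 ≤ mouse_y ∧ mouse_y ≤ 120
  · rw [if_pos h2]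
    exact ((pvAltHit mouse_x mouse_y 1 0 (by omega)).trans (by decide)).symm
  rw [if_neg h2]
  by_cases h3 : 190 ≤ mouse_x ∧ mouse_x ≤ 230 ∧ 80 ≤ mouse_y ∧ mouse_y ≤ 120
  · rw [if_pos h3]
    exact ((pvAltHit mouse_x mouse_y 2 0 (by omega)).trans (by decide)).symm
  rw [if_neg h3]
  by_cases h4 : 235 ≤ mouse_x ∧ mouse_x ≤ 275 ∧ 80 ≤ mouse_y ∧ mouse_y ≤ 120
  · rw [if_pos h4]
    exact ((pvAltHit mouse_x mouse_y 3 0 (by omega)).trans (by decide)).symm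
  rw [if_neg h4]
  by_cases h5 : 280 ≤ mouse_x ∧ mouse_x ≤ 320 ∧ 80 ≤ mouse_y ∧ mouse_y ≤ 120
  · rw [if_pos h5]
    exact ((pvAltHit mouse_x mouse_y 4 0 (by omega)).trans (by decide)).symm
  rw [if_neg h5]
  by_cases h6 : 325 ≤ mouse_x ∧ mouse_x ≤ 365 ∧ 80 ≤ mouse_y ∧ mouse_y ≤ 120
  · rw [if_pos h6]
    exact ((pvAltHit mouse_x mouse_y 5 0 (by omega)).trans (by decide)).symm
  rw [if_neg h6]
  by_cases h7 : 370 ≤ mouse_x ∧ mouse_x ≤ 410 ∧ 80 ≤ mouse_y ∧ mouse_y ≤ 120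
  · rw [if_pos h7]
    exact ((pvAltHit mouse_x mouse_y 6 0 (by omega)).trans (by decide)).symm
  rw [if_neg h7]
  by_cases h8 : 415 ≤ mouse_x ∧ mouse_x ≤ 455 ∧ 80 ≤ mouse_y ∧ mouse_y ≤ 120
  · rw [if_pos h8]
    exact ((pvAltHit mouse_x mouse_y 7 0 (by omega)).trans (by decide)).symm
  rw [if_neg h8]
  by_cases h9 : 460 ≤ mouse_x ∧ mouse_x ≤ 500 ∧ 80 ≤ mouse_y ∧ mouse_y ≤ 120
  · rw [if_pos h9]
    exact ((pvAltHit mouse_x mouse_y 8 0 (by omega)).trans (by decide)).symm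
  rw [if_neg h9]
  by_cases h10 : 505 ≤ mouse_x ∧ mouse_x ≤ 545 ∧ 80 ≤ mouse_y ∧ mouse_y ≤ 120
  · rw [if_pos h10]
    exact ((pvAltHit mouse_x mouse_y 9 0 (by omega)).trans (by decide)).symm
  rw [if_neg h10]
  by_cases h11 : 550 ≤ mouse_x ∧ mouse_x ≤ 590 ∧ 80 ≤ mouse_y ∧ mouse_y ≤ 120
  · rw [if_pos h11]
    exact ((pvAltHit mouse_x mouse_y 10 0 (by omega)).trans (by decide)).symm
  rw [if_neg h11]
  by_cases h12 : 595 ≤ mouse_x ∧ mouse_x ≤ 635 ∧ 80 ≤ mouse_y ∧ mouse_y ≤ 120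
  · rw [if_pos h12]
    exact ((pvAltHit mouse_x mouse_y 11 0 (by omega)).trans (by decide)).symm
  rw [if_neg h12]
  by_cases h13 : 640 ≤ mouse_x ∧ mouse_x ≤ 680 ∧ 80 ≤ mouse_y ∧ mouse_y ≤ 120
  · rw [if_pos h13]
    exact ((pvAltHit mouse_x mouse_y 12 0 (by omega)).trans (by decide)).symm
  rw [if_neg h13]
  by_cases h14 : 100 ≤ mouse_x ∧ mouse_x ≤ 140 ∧ 35 ≤ mouse_y ∧ mouse_y ≤ 75
  · rw [if_pos h14]
    exact ((pvAltHit mouse_x mouse_y 0 1 (by omega)).trans (by decide)).symm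
  rw [if_neg h14]
  by_cases h15 : 145 ≤ mouse_x ∧ mouse_x ≤ 185 ∧ 35 ≤ mouse_y ∧ mouse_y ≤ 75
  · rw [if_pos h15]
    exact ((pvAltHit mouse_x mouse_y 1 1 (by omega)).trans (by decide)).symm
  rw [if_neg h15]
  by_cases h16 : 190 ≤ mouse_x ∧ mouse_x ≤ 230 ∧ 35 ≤ mouse_y ∧ mouse_y ≤ 75
  · rw [if_pos h16]
    exact ((pvAltHit mouse_x mouse_y 2 1 (by omega)).trans (by decide)).symm
  rw [if_neg h16]
  by_cases h17 : 235 ≤ mouse_x ∧ mouse_x ≤ 275 ∧ 35 ≤ mouse_y ∧ mouse_y ≤ 75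
  · rw [if_pos h17]
    exact ((pvAltHit mouse_x mouse_y 3 1 (by omega)).trans (by decide)).symm
  rw [if_neg h17]
  by_cases h18 : 280 ≤ mouse_x ∧ mouse_x ≤ 320 ∧ 35 ≤ mouse_y ∧ mouse_y ≤ 75
  · rw [if_pos h18]
    exact ((pvAltHit mouse_x mouse_y 4 1 (by omega)).trans (by decide)).symm
  rw [if_neg h18]
  by_cases h19 : 325 ≤ mouse_x ∧ mouse_x ≤ 365 ∧ 35 ≤ mouse_y ∧ mouse_y ≤ 75
  · rw [if_pos h19]
    exact ((pvAltHit mouse_x mouse_y 5 1 (by omega)).trans (by decide)).symm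
  rw [if_neg h19]
  by_cases h20 : 370 ≤ mouse_x ∧ mouse_x ≤ 410 ∧ 35 ≤ mouse_y ∧ mouse_y ≤ 75
  · rw [if_pos h20]
    exact ((pvAltHit mouse_x mouse_y 6 1 (by omega)).trans (by decide)).symm
  rw [if_neg h20]
  by_cases h21 : 415 ≤ mouse_x ∧ mouse_x ≤ 455 ∧ 35 ≤ mouse_y ∧ mouse_y ≤ 75
  · rw [if_pos h21]
    exact ((pvAltHit mouse_x mouse_y 7 1 (by omega)).trans (by decide)).symm
  rw [if_neg h21]
  by_cases h22 : 460 ≤ mouse_x ∧ mouse_x ≤ 500 ∧ 35 ≤ mouse_y ∧ mouse_y ≤ 75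
  · rw [if_pos h22]
    exact ((pvAltHit mouse_x mouse_y 8 1 (by omega)).trans (by decide)).symm
  rw [if_neg h22]
  by_cases h23 : 505 ≤ mouse_x ∧ mouse_x ≤ 545 ∧ 35 ≤ mouse_y ∧ mouse_y ≤ 75
  · rw [if_pos h23]
    exact ((pvAltHit mouse_x mouse_y 9 1 (by omega)).trans (by decide)).symm
  rw [if_neg h23]
  by_cases h24 : 550 ≤ mouse_x ∧ mouse_x ≤ 590 ∧ 35 ≤ mouse_y ∧ mouse_y ≤ 75
  · rw [if_pos h24]
    exact ((pvAltHit mouse_x mouse_y 10 1 (by omega)).trans (by decide)).symm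
  rw [if_neg h24]
  by_cases h25 : 595 ≤ mouse_x ∧ mouse_x ≤ 635 ∧ 35 ≤ mouse_y ∧ mouse_y ≤ 75
  · rw [if_pos h25]
    exact ((pvAltHit mouse_x mouse_y 11 1 (by omega)).trans (by decide)).symm
  rw [if_neg h25]
  by_cases h26 : 640 ≤ mouse_x ∧ mouse_x ≤ 680 ∧ 35 ≤ mouse_y ∧ mouse_y ≤ 75
  · rw [if_pos h26]
    exact ((pvAltHit mouse_x mouse_y 12 1 (by omega)).trans (by decide)).symm
  rw [if_neg h26]
  -- no button contains the click: B's grid test must fail too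
  refine (pvAltMiss mouse_x mouse_y ?_).symm
  intro c r hc0 hc1 hr0 hr1
  interval_cases c <;> interval_cases r
  · intro hh; norm_num at hh; exact h1 hh
  · intro hh; norm_num at hh; exact h14 hh
  · intro hh; norm_num at hh; exact h2 hh
  · intro hh; norm_num at hh; exact h15 hh
  · intro hh; norm_num at hh; exact h3 hh
  · intro hh; norm_num at hh; exact h16 hh
  · intro hh; norm_num at hh; exact h4 hh
  · intro hh; norm_num at hh; exact h17 hh
  · intro hh; norm_num at hh; exact h5 hh
  · intro hh; norm_num at hh; exact h18 hh
  · intro hh; norm_num at hh; exact h6 hh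
  · intro hh; norm_num at hh; exact h19 hh
  · intro hh; norm_num at hh; exact h7 hh
  · intro hh; norm_num at hh; exact h20 hh
  · intro hh; norm_num at hh; exact h8 hh
  · intro hh; norm_num at hh; exact h21 hh
  · intro hh; norm_num at hh; exact h9 hh
  · intro hh; norm_num at hh; exact h22 hh
  · intro hh; norm_num at hh; exact h10 hh
  · intro hh; norm_num at hh; exact h23 hh
  · intro hh; norm_num at hh; exact h11 hh
  · intro hh; norm_num at hh; exact h24 hh
  · intro hh; norm_num at hh; exact h12 hh
  · intro hh; norm_num at hh; exact h25 hh
  · intro hh; norm_num at hh; exact h13 hh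
  · intro hh; norm_num at hh; exact h26 hh

-- ===== VERDICT (by name: the statement is the Claim_ definition above) =====
theorem get_clicked_letter_spec : Claim_equal_get_clicked_letter := by
  intro mouse_x mouse_y _
  exact get_clicked_letter_spec_aux mouse_x mouse_y
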